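-- pv_equiv track=rewrite | github.com/ldydek/AGH-ASD | Exams/2019-2020/3. exam/2.task.py | tower
-- ===== SOURCE A (Python) =====
-- def include(x, y):
--     return x[0] <= y[0] and y[1] <= x[1]
--
-- def tower(A):
--     n = len(A)
--     aux_tab = [1] * n
--     for x in range(1, n):
--         best = 0
--         for y in range(x):
--             if include(A[y], A[x]):
--                 best = max(best, aux_tab[y])
--         aux_tab[x] = best + 1
--     return max(aux_tab)
-- ===== SOURCE B (Python) =====
-- def include(x, y):
--     return x[0] <= y[0] and y[1] <= x[1]
--
-- def tower(A):
--     # Layer-peeling instead of DP: repeatedly discard every interval that has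
--     # no earlier surviving interval containing it; the number of peeling
--     # rounds is the length of the longest index-ordered nested chain.
--     rem = list(A)
--     rounds = 0
--     while rem:
--         rounds += 1
--         rem = [rem[i] for i in range(len(rem))
--                if any(include(y, rem[i]) for y in rem[:i])]
--     return rounds
-- ===== Notes on version B (the rewrite author's own statement) =====
-- stated objective: alternative
-- what changed: B replaces A's quadratic longest-nested-chain DP table with layer peeling: it repeatedly discards every interval that has no earlier surviving container and returns the number of peeling rounds.
import Mathlib
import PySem

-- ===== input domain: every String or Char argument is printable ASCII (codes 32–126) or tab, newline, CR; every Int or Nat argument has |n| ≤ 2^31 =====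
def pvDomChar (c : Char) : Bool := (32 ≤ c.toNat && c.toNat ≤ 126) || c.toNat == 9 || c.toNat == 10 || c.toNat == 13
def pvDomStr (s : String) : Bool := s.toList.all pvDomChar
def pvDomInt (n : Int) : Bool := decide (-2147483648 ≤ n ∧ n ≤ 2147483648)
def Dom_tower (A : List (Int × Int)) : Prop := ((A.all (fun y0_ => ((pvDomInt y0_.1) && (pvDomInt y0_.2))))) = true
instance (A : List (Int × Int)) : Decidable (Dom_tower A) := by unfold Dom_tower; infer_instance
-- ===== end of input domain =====

-- B replaces the longest-nested-chain DP by layer peeling (repeatedly discard intervals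
-- with no earlier surviving container; the answer is the number of rounds): a different
-- algorithm, not claimed faster.

-- ===== PORT A =====
-- include(x, y): x[0] <= y[0] and y[1] <= x[1]  (helper shared verbatim by A and B)
def pvInclude (x y : Int × Int) : Bool := decide (x.1 ≤ y.1) && decide (y.2 ≤ x.2)

-- inner loop of A: best = running max of aux_tab[y] over y in range(x) with include(A[y], A[x])
def towerInner (A : List (Int × Int)) (aux : List Int) (x : Int) : Int :=
  (PySem.List.pyRange 0 x 1).foldl (fun best y =>
    if pvInclude (PySem.List.pyGetD A y ((0:Int),(0:Int))) (PySem.List.pyGetD A x ((0:Int),(0:Int)))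
    then max best (PySem.List.pyGetD aux y (0:Int)) else best) 0

-- body of A's outer loop: aux_tab[x] = best + 1
def towerStep (A : List (Int × Int)) (aux : List Int) (x : Int) : List Int :=
  PySem.List.pySetD aux x (towerInner A aux x + 1)

def tower (A : List (Int × Int)) : Int :=
  let n : Int := (A.length : Int)
  let aux := (PySem.List.pyRange 1 n 1).foldl (towerStep A) (List.replicate A.length (1:Int))
  -- max(aux_tab) raises on the empty list; that input is excluded by Pre_tower
  (PySem.List.max? aux (fun v => v)).getD 0

-- ===== PORT B =====
-- one peeling round: keep rem[i] iff some y in rem[:i] includes rem[i]  (pre = rem[:i])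
def keepStep (pre : List (Int × Int)) : List (Int × Int) → List (Int × Int)
  | [] => []
  | x :: rest =>
      if pre.any (fun y => pvInclude y x) then x :: keepStep (pre ++ [x]) rest
      else keepStep (pre ++ [x]) rest

-- B's while loop; fuel only makes it structurally total (each round drops the first
-- element, so rem.length + 1 rounds always suffice and the 0-fuel branch is unreachable)
def towerLoopF : Nat → List (Int × Int) → Int → Int
  | 0, _, rounds => rounds
  | _ + 1, [], rounds => rounds
  | f + 1, x :: rest, rounds => towerLoopF f (keepStep [] (x :: rest)) (rounds + 1)

def tower_alt (A : List (Int × Int)) : Int := towerLoopF (A.length + 1) A 0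

-- ===== PRECONDITION & SPEC =====
-- Pre_ excludes only the empty list, on which A's max(aux_tab) raises ValueError.
def Pre_tower (A : List (Int × Int)) : Prop := A ≠ []
instance (A : List (Int × Int)) : Decidable (Pre_tower A) := by unfold Pre_tower; infer_instance
def pvWitness_tower : (List (Int × Int)) := [((0:Int), (0:Int))]

def Spec_tower (A : List (Int × Int)) (out : Int) : Prop := out = tower_alt A
instance (A : List (Int × Int)) (out : Int) : Decidable (Spec_tower A out) := by unfold Spec_tower; infer_instance

-- ===== CLAIM (what is proved, stated in full; the proofs are below) =====
def Claim_equal_tower : Prop := ∀ (A : List (Int × Int)), Dom_tower A → Pre_tower A → Spec_tower A (tower A)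

-- ===== LEMMAS AND PROOFS =====

-- Functional model of the DP: dpPairs A pairs every interval with its chain length.
def bestOf (acc : List ((Int × Int) × Int)) (x : Int × Int) : Int :=
  acc.foldl (fun b p => if pvInclude p.1 x then max b p.2 else b) 0

def dpPairs (A : List (Int × Int)) : List ((Int × Int) × Int) :=
  A.foldl (fun acc z => acc ++ [(z, bestOf acc z + 1)]) []

theorem dpPairs_snoc (A : List (Int × Int)) (z : Int × Int) :
    dpPairs (A ++ [z]) = dpPairs A ++ [(z, bestOf (dpPairs A) z + 1)] := by
  simp [dpPairs, List.foldl_append]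

theorem dpPairs_fst (A : List (Int × Int)) : (dpPairs A).map Prod.fst = A := by
  induction A using List.reverseRecOn with
  | nil => simp [dpPairs]
  | append_singleton A z ih => simp [dpPairs_snoc, ih]

theorem length_dpPairs (A : List (Int × Int)) : (dpPairs A).length = A.length := by
  have := congrArg List.length (dpPairs_fst A); simpa using this

theorem bestOf_snoc (acc : List ((Int × Int) × Int)) (q : (Int × Int) × Int) (x : Int × Int) :
    bestOf (acc ++ [q]) x = if pvInclude q.1 x then max (bestOf acc x) q.2 else bestOf acc x := by
  simp [bestOf, List.foldl_append]

theorem bestOf_nonneg (acc : List ((Int × Int) × Int)) (x : Int × Int) : 0 ≤ bestOf acc x := by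
  induction acc using List.reverseRecOn with
  | nil => simp [bestOf]
  | append_singleton acc q ih =>
      rw [bestOf_snoc]; split
      · exact le_trans ih (le_max_left _ _)
      · exact ih

theorem bestOf_le_iff (acc : List ((Int × Int) × Int)) (x : Int × Int) (c : Int) (hc : 0 < c) :
    c ≤ bestOf acc x ↔ ∃ p ∈ acc, pvInclude p.1 x = true ∧ c ≤ p.2 := by
  induction acc using List.reverseRecOn with
  | nil =>
      simp only [bestOf, List.foldl_nil, List.not_mem_nil, false_and, exists_false,
        iff_false, not_le]
      omega
  | append_singleton acc q ih =>
      rw [bestOf_snoc]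
      by_cases hq : pvInclude q.1 x = true
      · rw [if_pos hq]
        simp only [le_max_iff, ih]
        constructor
        · rintro (⟨p, hp, h1, h2⟩ | h)
          · exact ⟨p, by simp [hp], h1, h2⟩
          · exact ⟨q, by simp, hq, h⟩
        · rintro ⟨p, hp, h1, h2⟩
          rcases List.mem_append.1 hp with hp | hp
          · exact Or.inl ⟨p, hp, h1, h2⟩
          · simp at hp; subst hp; exact Or.inr h2
      · rw [if_neg hq, ih]
        constructor
        · rintro ⟨p, hp, h1, h2⟩; exact ⟨p, by simp [hp], h1, h2⟩
        · rintro ⟨p, hp, h1, h2⟩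
          rcases List.mem_append.1 hp with hp | hp
          · exact ⟨p, hp, h1, h2⟩
          · simp at hp; subst hp; exact absurd h1 hq

theorem dpPairs_pos (A : List (Int × Int)) : ∀ p ∈ dpPairs A, 1 ≤ p.2 := by
  induction A using List.reverseRecOn with
  | nil => simp [dpPairs]
  | append_singleton A z ih =>
      intro p hp
      rw [dpPairs_snoc] at hp
      rcases List.mem_append.1 hp with hp | hp
      · exact ih p hp
      · simp only [List.mem_singleton] at hp; subst hp
        have := bestOf_nonneg (dpPairs A) z; simp; omega

-- ===== A-side: the nested index loops compute the dp values =====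

theorem towerInner_eq (A : List (Int × Int)) (i : Nat) (hi : i < A.length) (R : List Int) :
    towerInner A ((dpPairs (A.take i)).map Prod.snd ++ R) (i : Int)
      = bestOf (dpPairs (A.take i)) A[i] := by
  have hlen : (dpPairs (A.take i)).length = i := by
    rw [length_dpPairs, List.length_take]; omega
  unfold towerInner
  rw [PySem.List.pyGetD_eq_getElem A ((0:Int),(0:Int)) (by omega)
      (by exact_mod_cast Int.ofNat_lt.2 hi)]
  have hcong : ∀ (b : Int), ∀ y ∈ PySem.List.pyRange 0 (i:Int) 1,
      (fun best y =>
        if pvInclude (PySem.List.pyGetD A y ((0:Int),(0:Int))) A[((i:Int)).toNat]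
        then max best (PySem.List.pyGetD ((dpPairs (A.take i)).map Prod.snd ++ R) y (0:Int)) else best) b y
      = (fun best y =>
          if pvInclude (PySem.List.pyGetD (dpPairs (A.take i)) y (((0:Int),(0:Int)), (0:Int))).1 A[((i:Int)).toNat]
          then max best (PySem.List.pyGetD (dpPairs (A.take i)) y (((0:Int),(0:Int)), (0:Int))).2 else best) b y := by
    intro b y hy
    rw [PySem.List.mem_pyRange_one] at hy
    obtain ⟨k, rfl⟩ : ∃ k : Nat, y = (k : Int) := ⟨y.toNat, (Int.toNat_of_nonneg hy.1).symm⟩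
    have hk : k < i := by exact_mod_cast hy.2
    simp only [PySem.List.pyGetD_natCast]
    have h1 : A.getD k ((0:Int),(0:Int)) = A[k] := List.getD_eq_getElem A _ (by omega)
    have h2 : (dpPairs (A.take i)).getD k (((0:Int),(0:Int)),(0:Int))
        = (dpPairs (A.take i))[k]'(by omega) := List.getD_eq_getElem _ _ (by omega)
    have h3 : ((dpPairs (A.take i)).map Prod.snd ++ R).getD k (0:Int)
        = ((dpPairs (A.take i)).map Prod.snd ++ R)[k]'(by simp [hlen]; omega) :=
      List.getD_eq_getElem _ _ (by simp [hlen]; omega)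
    have hfst : ((dpPairs (A.take i))[k]'(by omega)).1 = A[k] := by
      have := List.getElem_map (Prod.fst) (l := dpPairs (A.take i)) (i := k) (h := by rw [List.length_map]; omega)
      rw [← this]
      have hh := dpPairs_fst (A.take i)
      simp [hh, List.getElem_take]
    have hsnd : ((dpPairs (A.take i)).map Prod.snd ++ R)[k]'(by simp [hlen]; omega)
        = ((dpPairs (A.take i))[k]'(by omega)).2 := by
      rw [List.getElem_append_left (by simp [hlen]; omega)]
      simp
    rw [h1, h2, h3, hfst, hsnd]
  have hi' : (i : Int) = ((dpPairs (A.take i)).length : Int) := by rw [hlen]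
  refine (PySem.List.foldl_congr_mem _ _ _ 0 hcong).trans ?_
  simp only [Int.toNat_natCast]
  have hfold := PySem.List.foldl_pyRange_zero_pyGetD' (dpPairs (A.take i)) (((0:Int),(0:Int)), (0:Int))
      (fun best p => if pvInclude p.1 (A[i]'hi) then max best p.2 else best) 0
  rw [← hi'] at hfold
  exact hfold

theorem auxInv (A : List (Int × Int)) (j : Nat) (hj : j < A.length) :
    (PySem.List.pyRange 1 (1 + (j:Int)) 1).foldl (towerStep A) (List.replicate A.length (1:Int))
      = (dpPairs (A.take (j+1))).map Prod.snd ++ List.replicate (A.length - (j+1)) 1 := by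
  induction j with
  | zero =>
      rw [show (1 + ((0:Nat):Int)) = 1 by norm_num, PySem.List.pyRange_one_eq_nil le_rfl]
      have h0 : A.take 1 = [A[0]] := by
        rcases A with _ | ⟨a, t⟩
        · simp at hj
        · simp
      rw [List.foldl_nil, h0]
      have : dpPairs [A[0]] = [(A[0], 1)] := by simp [dpPairs, bestOf]
      rw [this]
      rcases Nat.exists_eq_add_of_lt hj with ⟨m, hm⟩
      simp [show A.length = m + 1 by omega, List.replicate_succ]
  | succ j ih =>
      have hj' : j < A.length := by omega
      have hle : (1:Int) ≤ 1 + (j:Int) := by omega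
      rw [show (1 + ((j+1:Nat)):Int) = (1 + (j:Int)) + 1 by push_cast; ring,
          PySem.List.pyRange_one_succ_right hle, List.foldl_append, List.foldl_cons,
          List.foldl_nil, ih hj']
      set S := (dpPairs (A.take (j+1))).map Prod.snd with hS
      have hSlen : S.length = j + 1 := by
        rw [hS, List.length_map, length_dpPairs, List.length_take]; omega
      have hcast : (1 + (j:Int)) = (((j+1:Nat)):Int) := by push_cast; ring
      rw [towerStep, hcast]
      rw [towerInner_eq A (j+1) hj (List.replicate (A.length - (j+1)) 1)]
      rw [PySem.List.pySetD_natCast]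
      have hset : (S ++ List.replicate (A.length - (j+1)) 1).set (j+1)
            (bestOf (dpPairs (A.take (j+1))) A[j+1] + 1)
          = S ++ (List.replicate (A.length - (j+1)) 1).set 0
            (bestOf (dpPairs (A.take (j+1))) A[j+1] + 1) := by
        rw [List.set_append, if_neg (by omega), hSlen, Nat.sub_self]
      rw [hset]
      have hrep : A.length - (j+1) = (A.length - (j+2)) + 1 := by omega
      rw [hrep, List.replicate_succ, List.set_cons_zero]
      have htake : A.take (j+2) = A.take (j+1) ++ [A[j+1]] := by
        rw [List.take_add_one, List.getElem?_eq_getElem hj]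
        simp
      rw [htake, dpPairs_snoc]
      simp [hS]

theorem tower_eq (A : List (Int × Int)) (hA : A ≠ []) :
    tower A = ((dpPairs A).map Prod.snd).foldl max 0 := by
  have hlen : 0 < A.length := List.length_pos_of_ne_nil hA
  have hcast : (A.length : Int) = 1 + ((A.length - 1 : Nat) : Int) := by
    push_cast [Nat.cast_sub (by omega : 1 ≤ A.length)]; ring
  have tdef : tower A = (PySem.List.max? ((PySem.List.pyRange 1 ((A.length:Int)) 1).foldl
      (towerStep A) (List.replicate A.length (1:Int))) (fun v => v)).getD 0 := rfl
  rw [tdef, hcast, auxInv A (A.length - 1) (by omega)]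
  rw [show A.length - 1 + 1 = A.length by omega, List.take_length, Nat.sub_self,
      List.replicate_zero, List.append_nil]
  rcases h : (dpPairs A).map Prod.snd with _ | ⟨v, t⟩
  · exfalso
    have h0 : A.length = 0 := by simpa [length_dpPairs] using congrArg List.length h
    omega
  · rw [PySem.List.max?_id_cons, Option.getD_some, List.foldl_cons]
    have hv : 1 ≤ v := by
      have hmem : v ∈ (dpPairs A).map Prod.snd := by rw [h]; simp
      rcases List.mem_map.1 hmem with ⟨p, hp, hpv⟩
      rw [← hpv]; exact dpPairs_pos A p hp
    rw [max_eq_right (by omega : (0:Int) ≤ v)]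

-- ===== B-side: peeling rounds count dp layers =====

theorem keepStep_length (l : List (Int × Int)) : ∀ pre, (keepStep pre l).length ≤ l.length := by
  induction l with
  | nil => intro pre; simp [keepStep]
  | cons x rest ih =>
      intro pre
      simp only [keepStep]
      split
      · simpa using Nat.succ_le_succ (ih (pre ++ [x]))
      · exact Nat.le_succ_of_le (ih (pre ++ [x]))

theorem keepStep_snoc (l : List (Int × Int)) : ∀ pre x, keepStep pre (l ++ [x])
    = keepStep pre l ++ (if (pre ++ l).any (fun y => pvInclude y x) then [x] else []) := by
  induction l with
  | nil => intro pre x; rw [List.append_nil]; simp [keepStep]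
  | cons h t ih =>
      intro pre x
      simp only [List.cons_append, keepStep]
      have hpre : pre ++ [h] ++ t = pre ++ h :: t := by simp
      split
      · rw [ih, hpre]; rfl
      · rw [ih, hpre]

theorem keepStep_filter (A : List (Int × Int)) (r : Int) (hr : 0 ≤ r) :
    keepStep [] (((dpPairs A).filter (fun p => decide (r < p.2))).map Prod.fst)
      = ((dpPairs A).filter (fun p => decide (r+1 < p.2))).map Prod.fst := by
  induction A using List.reverseRecOn with
  | nil => simp [dpPairs, keepStep]
  | append_singleton A z ih =>
      rw [dpPairs_snoc, List.filter_append, List.filter_append]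
      set dz := bestOf (dpPairs A) z + 1 with hdz
      by_cases h1 : r < dz
      · have hfilt1 : List.filter (fun p => decide (r < p.2)) [(z, dz)] = [(z, dz)] := by
          simp [h1]
        rw [hfilt1, List.map_append, List.map_cons, List.map_nil, keepStep_snoc]
        have hany : (([] : List (Int × Int)) ++ ((dpPairs A).filter (fun p => decide (r < p.2))).map Prod.fst).any (fun y => pvInclude y z)
            = decide (r + 1 < dz) := by
          rw [List.nil_append, Bool.eq_iff_iff]
          simp only [List.any_eq_true, List.mem_map, List.mem_filter, decide_eq_true_eq]
          rw [hdz]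
          have := bestOf_le_iff (dpPairs A) z (r+1) (by omega)
          constructor
          · rintro ⟨y, ⟨p, ⟨hp, hr2⟩, rfl⟩, hinc⟩
            have : r + 1 ≤ bestOf (dpPairs A) z := this.2 ⟨p, hp, hinc, by omega⟩
            omega
          · intro hlt
            rcases this.1 (by omega) with ⟨p, hp, hinc, hle⟩
            exact ⟨p.1, ⟨p, ⟨hp, by omega⟩, rfl⟩, hinc⟩
        rw [hany, ih]
        by_cases h2 : r + 1 < dz
        · simp [h2]
        · simp [h2]
      · have h2 : ¬ (r + 1 < dz) := by omega
        simp only [List.filter_cons, List.filter_nil, decide_eq_true_eq, h1, h2, if_false,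
          List.append_nil]
        simpa using ih

theorem towerLoopF_filter (k : Nat) : ∀ (A : List (Int × Int)) (r c : Int) (f : Nat), 0 ≤ r →
    (((dpPairs A).map Prod.snd).foldl max 0 - r).toNat = k →
    (((dpPairs A).filter (fun p => decide (r < p.2))).map Prod.fst).length < f →
    towerLoopF f (((dpPairs A).filter (fun p => decide (r < p.2))).map Prod.fst) c
      = c + max (((dpPairs A).map Prod.snd).foldl max 0 - r) 0 := by
  induction k with
  | zero =>
      intro A r c f hr hk hf
      set M := ((dpPairs A).map Prod.snd).foldl max 0 with hM
      have hMr : M - r ≤ 0 := by omega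
      have hub : ∀ y ∈ (dpPairs A).map Prod.snd, y ≤ M :=
        (PySem.List.le_foldl_max ((dpPairs A).map Prod.snd) 0).2
      have hnil : (dpPairs A).filter (fun p => decide (r < p.2)) = [] := by
        rw [List.filter_eq_nil_iff]
        intro p hp
        have : p.2 ≤ M := hub p.2 (List.mem_map.2 ⟨p, hp, rfl⟩)
        simp; omega
      rw [hnil]
      rcases f with _ | f
      · rw [hnil] at hf; exact absurd hf (by simp)
      · simp only [List.map_nil, towerLoopF]
        rw [max_eq_right (by omega : M - r ≤ (0:Int))]
        omega
  | succ k ihk =>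
      intro A r c f hr hk hf
      set M := ((dpPairs A).map Prod.snd).foldl max 0 with hM
      have hrM : r < M := by omega
      have hM0 : 0 < M := by omega
      -- the filtered list is nonempty: the max is attained
      have hmem : M ∈ (dpPairs A).map Prod.snd := by
        rcases PySem.List.foldl_max_mem ((dpPairs A).map Prod.snd) 0 with h | h
        · omega
        · exact h
      rcases List.mem_map.1 hmem with ⟨p, hp, hpM⟩
      have hpfilt : p ∈ (dpPairs A).filter (fun p => decide (r < p.2)) :=
        List.mem_filter.2 ⟨hp, by simp; omega⟩
      have hne : (((dpPairs A).filter (fun p => decide (r < p.2))).map Prod.fst) ≠ [] := by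
        simp only [ne_eq, List.map_eq_nil_iff]
        exact fun h => by rw [h] at hpfilt; simp at hpfilt
      rcases hL : (((dpPairs A).filter (fun p => decide (r < p.2))).map Prod.fst) with _ | ⟨x, rest⟩
      · exact absurd hL hne
      rw [hL] at hf ⊢
      rcases f with _ | f
      · exact absurd hf (Nat.not_lt_zero _)
      · simp only [towerLoopF]
        have hkeep : keepStep [] (x :: rest)
            = ((dpPairs A).filter (fun p => decide (r+1 < p.2))).map Prod.fst := by
          rw [← hL]; exact keepStep_filter A r hr
        rw [hkeep]
        have hlen2 : (((dpPairs A).filter (fun p => decide (r+1 < p.2))).map Prod.fst).length < f := by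
          have h1 : (keepStep [] (x :: rest)).length ≤ rest.length := by
            simp only [keepStep, List.any_nil, if_neg (Bool.false_ne_true), List.nil_append]
            exact keepStep_length rest [x]
          rw [hkeep] at h1
          have h2 : (x :: rest).length < f + 1 := hf
          simp at h2
          omega
        rw [ihk A (r+1) (c+1) f (by omega) (by omega) hlen2]
        rw [max_eq_left (by omega : (0:Int) ≤ M - (r+1)), max_eq_left (by omega : (0:Int) ≤ M - r)]
        ring

theorem tower_alt_eq (A : List (Int × Int)) (_hA : A ≠ []) :
    tower_alt A = ((dpPairs A).map Prod.snd).foldl max 0 := by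
  have hfilt : (dpPairs A).filter (fun p => decide ((0:Int) < p.2)) = dpPairs A := by
    rw [List.filter_eq_self]
    intro p hp
    have := dpPairs_pos A p hp
    simp; omega
  have hA' : ((dpPairs A).filter (fun p => decide ((0:Int) < p.2))).map Prod.fst = A := by
    rw [hfilt, dpPairs_fst]
  have hM0 : (0:Int) ≤ ((dpPairs A).map Prod.snd).foldl max 0 :=
    (PySem.List.le_foldl_max ((dpPairs A).map Prod.snd) 0).1
  unfold tower_alt
  conv_lhs => rw [← hA']
  rw [towerLoopF_filter ((((dpPairs A).map Prod.snd).foldl max 0).toNat) A 0 0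
    ((((dpPairs A).filter (fun p => decide ((0:Int) < p.2))).map Prod.fst).length + 1)
    le_rfl (by omega) (Nat.lt_succ_self _)]
  rw [max_eq_left (by omega)]
  omega

-- ===== VERDICT (by name: the statement is the Claim_ definition above) =====
theorem tower_spec : Claim_equal_tower := by
  intro A _ hPre
  unfold Spec_tower
  rw [tower_eq A hPre, tower_alt_eq A hPre]
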